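-- pv_equiv track=rewrite | github.com/cfestus/ALFIE_SemKG | utils/semantic_chunker.py | _trim_span
-- ===== SOURCE A (Python) =====
-- from typing import Any, List, Dict, Tuple
--
-- def _trim_span(text: str, start: int, end: int) -> Tuple[int, int]:
--     s = int(max(0, start))
--     e = int(max(s, end))
--     while s < e and text[s].isspace():
--         s += 1
--     while e > s and text[e - 1].isspace():
--         e -= 1
--     return s, e
-- ===== SOURCE B (Python) =====
-- def _trim_span(text: str, start: int, end: int):
--     s = int(max(0, start))
--     e = int(max(s, end))
--     sub = text[s:e]
--     new_s = s + (len(sub) - len(sub.lstrip()))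
--     return new_s, new_s + len(sub.strip())
-- ===== Notes on version B (the rewrite author's own statement) =====
-- stated objective: idiomatic
-- what changed: Replaces the two per-character while-loops with a single slice plus library lstrip/strip: the trimmed start is s plus the slice's leading-whitespace count and the trimmed end follows from the stripped length.
-- outside the precondition, e.g. on _trim_span('a', 0, 5): A raises IndexError, B returns (0, 1)
-- crash fix: A raises IndexError whenever the clamped end exceeds len(text) while the span is nonempty (end > len(text) and end > max(0, start)); B's clamped slice returns the trimmed span of the existing text there. — e.g. on _trim_span("a", 0, 5): A raises IndexError, B returns (0, 1)
import Mathlib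
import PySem

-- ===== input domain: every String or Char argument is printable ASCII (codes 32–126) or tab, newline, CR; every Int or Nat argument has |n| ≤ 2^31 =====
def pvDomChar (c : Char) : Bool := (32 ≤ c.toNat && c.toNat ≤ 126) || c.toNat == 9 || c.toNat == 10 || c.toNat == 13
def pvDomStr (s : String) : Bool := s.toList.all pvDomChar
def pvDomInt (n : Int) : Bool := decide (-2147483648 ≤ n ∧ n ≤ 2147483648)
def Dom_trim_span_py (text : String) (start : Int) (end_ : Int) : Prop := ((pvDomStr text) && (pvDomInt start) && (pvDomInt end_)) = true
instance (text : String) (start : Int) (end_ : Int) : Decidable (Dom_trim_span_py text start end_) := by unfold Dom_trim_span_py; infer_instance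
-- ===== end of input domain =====

-- B replaces A's two per-character while-loops with one slice plus library lstrip/strip (more idiomatic);
-- equivalence is on the return value (neither program mutates anything).

-- ===== PORT A =====
-- first while-loop: advance s while s < e and text[s].isspace()
def pvTrimLeftA (cs : List Char) (s e : Nat) : Nat :=
  if s < e then
    match PySem.List.pyGet? cs (s : Int) with
    | some c => if PySem.Chars.isspace c then pvTrimLeftA cs (s + 1) e else s
    | none => s      -- Python raises IndexError here (outside Pre_)
  else s
termination_by e - s

-- second while-loop: retreat e while e > s and text[e-1].isspace()
def pvTrimRightA (cs : List Char) (s e : Nat) : Nat :=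
  if s < e then
    match PySem.List.pyGet? cs ((e : Int) - 1) with
    | some c => if PySem.Chars.isspace c then pvTrimRightA cs s (e - 1) else e
    | none => e      -- Python raises IndexError here (outside Pre_)
  else e

def trim_span_py (text : String) (start : Int) (end_ : Int) : Int × Int :=
  let s : Int := max 0 start
  let e : Int := max s end_
  let s' := pvTrimLeftA text.toList s.toNat e.toNat
  let e' := pvTrimRightA text.toList s' e.toNat
  ((s' : Int), (e' : Int))

-- ===== PORT B =====
def trim_span_py_alt (text : String) (start : Int) (end_ : Int) : Int × Int :=
  let s : Int := max 0 start
  let e : Int := max s end_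
  let sub := PySem.Str.slice text (some s) (some e)
  let new_s : Int := s + (PySem.Str.len sub - PySem.Str.len (PySem.Str.lstrip sub))
  (new_s, new_s + PySem.Str.len (PySem.Str.strip sub))

-- ===== PRECONDITION & SPEC =====
-- Pre_ excludes exactly the inputs where A raises IndexError: a nonempty clamped span reaching past the end of text.
def Pre_trim_span_py (text : String) (start : Int) (end_ : Int) : Prop :=
  end_ ≤ (text.length : Int) ∨ end_ ≤ max 0 start
instance (text : String) (start : Int) (end_ : Int) : Decidable (Pre_trim_span_py text start end_) := by unfold Pre_trim_span_py; infer_instance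

def pvWitness_trim_span_py : String × Int × Int := (" a ", 0, 3)

-- A raises IndexError whenever end > len(text) and end > max(0, start); B's clamped slice returns the trimmed span of the existing text there.
def Raises_trim_span_py (text : String) (start : Int) (end_ : Int) : Prop :=
  (text.length : Int) < end_ ∧ max 0 start < end_
instance (text : String) (start : Int) (end_ : Int) : Decidable (Raises_trim_span_py text start end_) := by unfold Raises_trim_span_py; infer_instance
def pvRaiseWitness_trim_span_py : String × Int × Int := ("a", 0, 5)
def pvRaiseWitnessOut_trim_span_py : Int × Int := (0, 1)

def Spec_trim_span_py (text : String) (start : Int) (end_ : Int) (out : Int × Int) : Prop := out = trim_span_py_alt text start end_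
instance (text : String) (start : Int) (end_ : Int) (out : Int × Int) : Decidable (Spec_trim_span_py text start end_ out) := by unfold Spec_trim_span_py; infer_instance

-- ===== CLAIM (what is proved, stated in full; the proofs are below) =====
def Claim_equal_trim_span_py : Prop := ∀ (text : String) (start : Int) (end_ : Int), Dom_trim_span_py text start end_ → Pre_trim_span_py text start end_ → Spec_trim_span_py text start end_ (trim_span_py text start end_)

def Claim_raises_trim_span_py : Prop := (∀ (text : String) (start : Int) (end_ : Int), Dom_trim_span_py text start end_ → Raises_trim_span_py text start end_ → ¬ Pre_trim_span_py text start end_) ∧ (Dom_trim_span_py (pvRaiseWitness_trim_span_py.1) (pvRaiseWitness_trim_span_py.2.1) (pvRaiseWitness_trim_span_py.2.2) ∧ Raises_trim_span_py (pvRaiseWitness_trim_span_py.1) (pvRaiseWitness_trim_span_py.2.1) (pvRaiseWitness_trim_span_py.2.2) ∧ trim_span_py_alt (pvRaiseWitness_trim_span_py.1) (pvRaiseWitness_trim_span_py.2.1) (pvRaiseWitness_trim_span_py.2.2) = pvRaiseWitnessOut_trim_span_py)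

-- ===== LEMMAS AND PROOFS =====

theorem pvSeg_cons (cs : List Char) (s e : Nat) (h1 : s < e) (h2 : s < cs.length) :
    (cs.drop s).take (e - s) = cs[s] :: (cs.drop (s + 1)).take (e - (s + 1)) := by
  rw [List.drop_eq_getElem_cons h2]
  have : e - s = (e - (s + 1)) + 1 := by omega
  rw [this, List.take_succ_cons]

theorem pvGet_some (cs : List Char) (s : Nat) (h : s < cs.length) :
    PySem.List.pyGet? cs (s : Int) = some cs[s] := by
  simp [PySem.List.pyGet?, PySem.List.pyIdx?, h]

-- A's first loop lands at s plus the leading-whitespace count of the segment [s, e) of cs.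
theorem pvTrimLeftA_eq (cs : List Char) (s e : Nat) (hse : s ≤ e) (hen : e ≤ cs.length) :
    pvTrimLeftA cs s e = s + (((cs.drop s).take (e - s)).takeWhile PySem.Chars.isspace).length := by
  fun_induction pvTrimLeftA cs s e with
  | case1 s hlt c hget hsp ih =>
    have hsn : s < cs.length := by omega
    rw [pvGet_some cs s hsn] at hget
    obtain rfl : c = cs[s] := by injection hget.symm
    rw [pvSeg_cons cs s e hlt hsn, List.takeWhile_cons_of_pos hsp]
    rw [ih (by omega)]
    simp; omega
  | case2 s hlt c hget hsp =>
    have hsn : s < cs.length := by omega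
    rw [pvGet_some cs s hsn] at hget
    obtain rfl : c = cs[s] := by injection hget.symm
    rw [pvSeg_cons cs s e hlt hsn, List.takeWhile_cons_of_neg hsp]
    simp
  | case3 s hlt hget =>
    have hsn : s < cs.length := by omega
    rw [pvGet_some cs s hsn] at hget; cases hget
  | case4 s hlt =>
    obtain rfl : s = e := by omega
    simp

theorem pvRstrip_append (xs : List Char) (c : Char) :
    PySem.Chars.rstrip (xs ++ [c]) =
      if PySem.Chars.isspace c then PySem.Chars.rstrip xs else xs ++ [c] := by
  simp [PySem.Chars.rstrip, List.dropWhile_cons]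
  split_ifs with h <;> simp

theorem pvSeg_snoc (cs : List Char) (s e : Nat) (h1 : s < e) (h2 : e - 1 < cs.length) :
    (cs.drop s).take (e - s) = (cs.drop s).take (e - 1 - s) ++ [cs[e - 1]] := by
  have h3 : e - s = (e - 1 - s) + 1 := by omega
  rw [h3, List.take_add_one]
  congr 1
  rw [List.getElem?_drop]
  have : s + (e - 1 - s) = e - 1 := by omega
  rw [this, List.getElem?_eq_getElem h2]
  rfl

-- A's second loop lands at s plus the rstripped length of the segment [s, e) of cs.
theorem pvTrimRightA_eq (cs : List Char) (s e : Nat) (hse : s ≤ e) (hen : e ≤ cs.length) :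
    pvTrimRightA cs s e = s + (PySem.Chars.rstrip ((cs.drop s).take (e - s))).length := by
  fun_induction pvTrimRightA cs s e with
  | case1 e hlt c hget hsp ih =>
    have hsn : e - 1 < cs.length := by omega
    have hcast : ((e : Int) - 1) = ((e - 1 : Nat) : Int) := by omega
    rw [hcast, pvGet_some cs (e - 1) hsn] at hget
    obtain rfl : c = cs[e - 1] := by injection hget.symm
    rw [pvSeg_snoc cs s e hlt hsn, pvRstrip_append, if_pos hsp, ih (by omega) (by omega)]
  | case2 e hlt c hget hsp =>
    have hsn : e - 1 < cs.length := by omega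
    have hcast : ((e : Int) - 1) = ((e - 1 : Nat) : Int) := by omega
    rw [hcast, pvGet_some cs (e - 1) hsn] at hget
    obtain rfl : c = cs[e - 1] := by injection hget.symm
    rw [pvSeg_snoc cs s e hlt hsn, pvRstrip_append, if_neg hsp]
    have hlen : ((cs.drop s).take (e - 1 - s)).length = e - 1 - s := by
      simp; omega
    simp [hlen]; omega
  | case3 e hlt hget =>
    have hsn : e - 1 < cs.length := by omega
    have hcast : ((e : Int) - 1) = ((e - 1 : Nat) : Int) := by omega
    rw [hcast, pvGet_some cs (e - 1) hsn] at hget; cases hget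
  | case4 e hlt =>
    obtain rfl : s = e := by omega
    simp [PySem.Chars.rstrip]

theorem pvDropWhile_eq_drop (p : Char → Bool) (l : List Char) :
    l.dropWhile p = l.drop (l.takeWhile p).length := by
  induction l with
  | nil => simp
  | cons a l ih => by_cases h : p a <;> simp [h, ih]

-- ===== VERDICT (by name: the statement is the Claim_ definition above) =====
theorem trim_span_py_spec : Claim_equal_trim_span_py := by
  intro text start end_ hdom hpre
  unfold Spec_trim_span_py trim_span_py trim_span_py_alt
  simp only []
  set cs := text.toList with hcs
  set s : Int := max 0 start with hsdef
  set e : Int := max s end_ with hedef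
  have hs0 : 0 ≤ s := le_max_left _ _
  have hse : s ≤ e := le_max_left _ _
  have he0 : 0 ≤ e := le_trans hs0 hse
  set st := s.toNat with hst
  set en := e.toNat with hen
  have hsi : (st : Int) = s := Int.toNat_of_nonneg hs0
  have hei : (en : Int) = e := Int.toNat_of_nonneg he0
  have hsten : st ≤ en := by omega
  have hlen : (text.length : Int) = (cs.length : Int) := by
    simp [hcs]
  have hsub : (PySem.Str.slice text (some s) (some e)).toList
      = (cs.drop st).take (en - st) := by
    rw [PySem.Str.toList_slice, PySem.Chars.slice_eq_listSlice,
        PySem.List.slice_toNat _ hs0 he0]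
  have hcase : en ≤ cs.length ∨ st = en := by
    rcases hpre with h | h
    · by_cases h2 : end_ ≤ s
      · right; have : e = s := by omega
        omega
      · left; have : e = end_ := by omega
        omega
    · right; have : e = s := by omega
      omega
  rcases hcase with hcaseA | hcaseB
  · -- en ≤ length: both ports compute the trimmed span
    set seg := (cs.drop st).take (en - st) with hseg
    have hseglen : seg.length = en - st := by simp [hseg]; omega
    set tl := (seg.takeWhile PySem.Chars.isspace).length with htl
    have htl_le : tl ≤ en - st := by
      rw [htl, ← hseglen]; exact (List.takeWhile_sublist _).length_le
    have hL : pvTrimLeftA cs st en = st + tl := pvTrimLeftA_eq cs st en hsten hcaseA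
    have hseg' : (cs.drop (st + tl)).take (en - (st + tl)) = seg.dropWhile PySem.Chars.isspace := by
      rw [pvDropWhile_eq_drop, ← htl, hseg, List.drop_take, List.drop_drop]
      congr 1
      omega
    have hR : pvTrimRightA cs (st + tl) en
        = (st + tl) + (PySem.Chars.rstrip (seg.dropWhile PySem.Chars.isspace)).length := by
      rw [pvTrimRightA_eq cs (st + tl) en (by omega) hcaseA, hseg']
    have hlstrip : (PySem.Str.lstrip (PySem.Str.slice text (some s) (some e))).toList
        = seg.dropWhile PySem.Chars.isspace := by
      rw [PySem.Str.toList_lstrip, hsub]; rfl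
    have hstrip : (PySem.Str.strip (PySem.Str.slice text (some s) (some e))).toList
        = PySem.Chars.rstrip (seg.dropWhile PySem.Chars.isspace) := by
      rw [PySem.Str.toList_strip, hsub]; rfl
    have hdw_len : (seg.dropWhile PySem.Chars.isspace).length = seg.length - tl := by
      rw [pvDropWhile_eq_drop, ← htl, List.length_drop]
    have hBs : PySem.Str.len (PySem.Str.slice text (some s) (some e)) = ((en - st : Nat) : Int) := by
      simp only [PySem.Str.len, hsub]; rw [hseglen]
    have hBl : PySem.Str.len (PySem.Str.lstrip (PySem.Str.slice text (some s) (some e)))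
        = ((en - st - tl : Nat) : Int) := by
      simp only [PySem.Str.len, hlstrip]; rw [hdw_len, hseglen]
    have hBr : PySem.Str.len (PySem.Str.strip (PySem.Str.slice text (some s) (some e)))
        = (((PySem.Chars.rstrip (seg.dropWhile PySem.Chars.isspace)).length : Nat) : Int) := by
      simp [PySem.Str.len, hstrip]
    rw [hL, hR, hBs, hBl, hBr]
    simp only [Prod.mk.injEq]
    constructor <;> push_cast <;> omega
  · -- empty clamped span: both return (s, s)
    have h1 : pvTrimLeftA cs st en = st := by
      unfold pvTrimLeftA; simp [hcaseB]
    have h2 : pvTrimRightA cs st en = en := by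
      unfold pvTrimRightA; simp [hcaseB]
    have hsub0 : (PySem.Str.slice text (some s) (some e)).toList = [] := by
      rw [hsub, hcaseB]; simp
    have hls : (PySem.Str.lstrip (PySem.Str.slice text (some s) (some e))).toList = [] := by
      rw [PySem.Str.toList_lstrip, hsub0]; rfl
    have hstr : (PySem.Str.strip (PySem.Str.slice text (some s) (some e))).toList = [] := by
      rw [PySem.Str.toList_strip, hsub0]; rfl
    rw [h1, h2]
    simp only [PySem.Str.len, hsub0, hls, hstr, List.length_nil, Prod.mk.injEq]
    constructor <;> omega

theorem trim_span_py_raises : Claim_raises_trim_span_py := by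
  unfold Claim_raises_trim_span_py
  constructor
  · intro text start end_ _ hr hpre
    rcases hr with ⟨h1, h2⟩
    rcases hpre with h | h <;> omega
  · exact ⟨by decide, by decide, by decide⟩

-- self-check: the raise witness indeed lies in the raise region (a component of trim_span_py_raises)
theorem pvRaiseWitness_ok : Raises_trim_span_py pvRaiseWitness_trim_span_py.1 pvRaiseWitness_trim_span_py.2.1 pvRaiseWitness_trim_span_py.2.2 :=
  trim_span_py_raises.2.2.1
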